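-- pv_equiv track=rewrite | github.com/GaryLai91/algorithms | algorithms/big_clustering.py | compute_two_distance
-- ===== SOURCE A (Python) =====
-- def compute_two_distance(binary_string):
--     """
--     args: binary_string
--         binary_string = "1000"
--     """
--     bin_str = [i for i in binary_string]
--     two_combs = []
--     for i in range(len(bin_str)):
--         c = bin_str[:]
--         if c[i] == '0':
--             c[i] = '1'
--         else:
--             c[i] = '0'
--         for j in range(len(bin_str)):
--             d = c[:]
--             if i == j:
--                 continue
--             if bin_str[j] == '0':
--                 d[j] = "1"
--             else:
--                 d[j] = "0"
--             two_combs.append(d)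
--     d = {''.join(i): 1 for i in two_combs}
--     return d
-- ===== SOURCE B (Python) =====
-- def compute_two_distance(binary_string):
--     """
--     args: binary_string
--         binary_string = "1000"
--     """
--     # Right-to-left DP pass: for each suffix maintain the list of its
--     # one-flip variants and two-flip variants; extend both when a new
--     # head character is prepended.  Each distance-2 string is built once.
--     ones, twos, suffix = [], [], ''
--     for c in reversed(binary_string):
--         f = '1' if c == '0' else '0'
--         twos = [f + t for t in ones] + [c + t for t in twos]
--         ones = [f + suffix] + [c + t for t in ones]
--         suffix = c + suffix
--     return {t: 1 for t in twos}
-- ===== Notes on version B (the rewrite author's own statement) =====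
-- stated objective: alternative
-- what changed: B replaces A's ordered double loop over index pairs (copying/mutating char lists and deduplicating via a dict) with a single right-to-left DP pass that maintains, for each suffix, the lists of its one-flip and two-flip variants, extending both when a character is prepended, so indices, copies and the dedup step all disappear and each distance-2 string is built exactly once.
import Mathlib
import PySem

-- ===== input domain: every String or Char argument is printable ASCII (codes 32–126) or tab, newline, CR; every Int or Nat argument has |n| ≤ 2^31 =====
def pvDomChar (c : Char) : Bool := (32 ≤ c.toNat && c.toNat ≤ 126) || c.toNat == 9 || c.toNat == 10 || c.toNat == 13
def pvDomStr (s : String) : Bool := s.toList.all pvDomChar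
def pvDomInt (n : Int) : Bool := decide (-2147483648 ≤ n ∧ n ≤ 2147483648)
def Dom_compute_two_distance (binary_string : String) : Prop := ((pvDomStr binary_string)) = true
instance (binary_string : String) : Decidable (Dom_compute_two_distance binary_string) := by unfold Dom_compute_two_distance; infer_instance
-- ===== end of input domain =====

-- B replaces A's ordered double loop + copy/mutate lists + dedup-by-dict with a single
-- right-to-left pass that maintains, per suffix, the lists of one-flip and two-flip
-- variants, building each distance-2 string exactly once (alternative decomposition).

-- ===== PORT A =====
-- literal port of A: ordered double loop over all i ≠ j, flipping positions i and j of a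
-- copied char list, then dedup via a dict comprehension mapping each joined string to 1.
def compute_two_distance (binary_string : String) : List (String × Int) :=
  let bin_str := binary_string.toList
  let two_combs : List (List Char) :=
    (PySem.List.pyRange 0 (bin_str.length : Int) 1).foldl (fun acc i =>
      let c0 := PySem.List.slice bin_str none none            -- c = bin_str[:]
      let c := if PySem.List.pyGetD c0 i ' ' = '0'
               then PySem.List.pySetD c0 i '1'
               else PySem.List.pySetD c0 i '0'
      (PySem.List.pyRange 0 (bin_str.length : Int) 1).foldl (fun acc2 j =>
        let d0 := PySem.List.slice c none none                -- d = c[:]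
        if i = j then acc2                                    -- continue
        else
          let d := if PySem.List.pyGetD bin_str j ' ' = '0'
                   then PySem.List.pySetD d0 j '1'
                   else PySem.List.pySetD d0 j '0'
          acc2 ++ [d]) acc) []
  -- d = {''.join(i): 1 for i in two_combs}  (''.join of a char list = String.ofList)
  let d := two_combs.foldl (fun dd l => dd.insert (String.ofList l) (1 : Int)) PySem.Dict.empty
  d.items

-- ===== PORT B =====
-- transliteration of Source B: fold over the reversed characters with state
-- (ones, twos, suffix); Python strings are carried as List Char and joined at the end.
def compute_two_distance_alt (binary_string : String) : List (String × Int) :=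
  let st := binary_string.toList.reverse.foldl
    (fun (st : List (List Char) × List (List Char) × List Char) c =>
      let f : Char := if c = '0' then '1' else '0'
      let twos := st.1.map (f :: ·) ++ st.2.1.map (c :: ·)
      let ones := (f :: st.2.2) :: st.1.map (c :: ·)
      (ones, twos, c :: st.2.2))
    ([], [], [])
  (PySem.Dict.ofList (st.2.1.map (fun t => (String.ofList t, (1 : Int))))).items

-- ===== PRECONDITION & SPEC =====
def Spec_compute_two_distance (binary_string : String) (out : List (String × Int)) : Prop := out = compute_two_distance_alt binary_string
instance (binary_string : String) (out : List (String × Int)) : Decidable (Spec_compute_two_distance binary_string out) := by unfold Spec_compute_two_distance; infer_instance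

-- ===== CLAIM (what is proved, stated in full; the proofs are below) =====
def Claim_equal_compute_two_distance : Prop := ∀ (binary_string : String), Dom_compute_two_distance binary_string → Spec_compute_two_distance binary_string (compute_two_distance binary_string)

-- ===== LEMMAS AND PROOFS =====

-- flipping rule shared by both programs
def flipC (c : Char) : Char := if c = '0' then '1' else '0'

theorem flipC_ne (c : Char) : flipC c ≠ c := by
  unfold flipC; split_ifs with h
  · simp [h]
  · exact fun hc => h hc.symm

-- the string at Hamming distance 2 obtained by flipping positions i and j
def key (cs : List Char) (i j : Nat) : List Char :=
  (cs.set i (flipC (cs.getD i ' '))).set j (flipC (cs.getD j ' '))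

-- A's stream of strings: for each i, every j ≠ i
def rowA (cs : List Char) (i : Nat) : List String :=
  ((List.range cs.length).filter (fun j => !(i == j))).map (fun j => String.ofList (key cs i j))

-- B's stream of strings: for each i, every j > i
def rowB (cs : List Char) (i : Nat) : List String :=
  ((List.range cs.length).filter (fun j => decide (i < j))).map (fun j => String.ofList (key cs i j))

theorem key_comm (cs : List Char) (i j : Nat) (h : i ≠ j) : key cs i j = key cs j i := by
  unfold key
  rw [List.set_comm _ _ h]

theorem key_length (cs : List Char) (i j : Nat) : (key cs i j).length = cs.length := by
  simp [key]

theorem key_getElem_of_ne (cs : List Char) (i j k : Nat) (hk : k < cs.length)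
    (hki : k ≠ i) (hkj : k ≠ j) :
    (key cs i j)[k]'(by rw [key_length]; exact hk) = cs[k] := by
  unfold key
  rw [List.getElem_set_ne (by omega), List.getElem_set_ne (by omega)]

theorem key_getElem_fst (cs : List Char) (i j : Nat) (hi : i < cs.length) (hij : i ≠ j) :
    (key cs i j)[i]'(by rw [key_length]; exact hi) = flipC cs[i] := by
  unfold key
  rw [List.getElem_set_ne (by omega), List.getElem_set_self (by simpa using hi)]
  congr 1
  exact List.getD_eq_getElem cs ' ' hi

theorem key_getElem_snd (cs : List Char) (i j : Nat) (hj : j < cs.length) :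
    (key cs i j)[j]'(by rw [key_length]; exact hj) = flipC cs[j] := by
  unfold key
  rw [List.getElem_set_self (by simpa using hj)]
  congr 1
  exact List.getD_eq_getElem cs ' ' hj

-- a flipped position of key i j differs from cs there; every other position agrees,
-- so key cs i j = key cs i' j' forces {i, j} = {i', j'}
theorem key_mem_of_eq (cs : List Char) (i j i' j' : Nat)
    (hi : i < cs.length) (hj : j < cs.length) (hij : i ≠ j) (_hi'j' : i' ≠ j')
    (h : key cs i j = key cs i' j') : (i = i' ∨ i = j') ∧ (j = i' ∨ j = j') := by
  constructor
  · by_contra hc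
    push Not at hc
    have h1 : (key cs i j)[i]'(by rw [key_length]; exact hi) = flipC cs[i] :=
      key_getElem_fst cs i j hi hij
    have h2 : (key cs i' j')[i]'(by rw [key_length]; exact hi) = cs[i] :=
      key_getElem_of_ne cs i' j' i hi hc.1 hc.2
    have e : (key cs i j)[i]'(by rw [key_length]; exact hi)
           = (key cs i' j')[i]'(by rw [key_length]; exact hi) :=
      List.getElem_of_eq h _
    exact flipC_ne cs[i] (h1.symm.trans (e.trans h2))
  · by_contra hc
    push Not at hc
    have h1 : (key cs i j)[j]'(by rw [key_length]; exact hj) = flipC cs[j] :=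
      key_getElem_snd cs i j hj
    have h2 : (key cs i' j')[j]'(by rw [key_length]; exact hj) = cs[j] :=
      key_getElem_of_ne cs i' j' j hj hc.1 hc.2
    have e : (key cs i j)[j]'(by rw [key_length]; exact hj)
           = (key cs i' j')[j]'(by rw [key_length]; exact hj) :=
      List.getElem_of_eq h _
    exact flipC_ne cs[j] (h1.symm.trans (e.trans h2))

theorem key_inj (cs : List Char) (i j i' j' : Nat)
    (hi : i < cs.length) (hj : j < cs.length) (hi' : i' < cs.length) (hj' : j' < cs.length)
    (hij : i ≠ j) (hi'j' : i' ≠ j')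
    (h : key cs i j = key cs i' j') : (i = i' ∧ j = j') ∨ (i = j' ∧ j = i') := by
  have h1 := key_mem_of_eq cs i j i' j' hi hj hij hi'j' h
  have h2 := key_mem_of_eq cs i' j' i j hi' hj' hi'j' hij h.symm
  omega


-- ---- normal form of port A ----

-- one flip step of either loop body, as List.set with flipC
theorem flip_step (a b : List Char) (i : Nat) :
    (if PySem.List.pyGetD a (i : Int) ' ' = '0'
     then PySem.List.pySetD b (i : Int) '1'
     else PySem.List.pySetD b (i : Int) '0') = b.set i (flipC (a.getD i ' ')) := by
  rw [PySem.List.pyGetD_natCast, PySem.List.pySetD_natCast, PySem.List.pySetD_natCast]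
  unfold flipC
  split_ifs <;> rfl

-- A's inner loop (skip on i = j, append otherwise) in filter/map form
theorem foldl_skip_eq (f : Nat → List Char) (i : Nat) (l : List Nat) (acc : List (List Char)) :
    l.foldl (fun acc2 j => if i = j then acc2 else acc2 ++ [f j]) acc
      = acc ++ (l.filter (fun j => !(i == j))).map f := by
  have hfun : (fun (acc2 : List (List Char)) j => if i = j then acc2 else acc2 ++ [f j])
      = (fun acc2 j => if (!(i == j)) = true then acc2 ++ [f j] else acc2) := by
    funext acc2 j
    by_cases h : i = j <;> simp [h]
  rw [hfun, PySem.List.foldl_append_if]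

-- A's deduped stream of joined strings is the concatenation of the rowA streams
theorem flatMap_rowA (cs : List Char) :
    (List.range cs.length).flatMap (rowA cs)
      = ((List.range cs.length).flatMap (fun i =>
          ((List.range cs.length).filter (fun j => !(i == j))).map (key cs i))).map
          String.ofList := by
  rw [List.map_flatMap]
  unfold rowA
  simp only [List.map_map]
  rfl

theorem a_two_combs (s : String) :
    compute_two_distance s =
      (((List.range s.toList.length).flatMap (rowA s.toList)).foldl
          (fun dd k => dd.insert k (1 : Int)) PySem.Dict.empty).items := by
  unfold compute_two_distance
  rw [flatMap_rowA, List.foldl_map]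
  simp only [PySem.List.slice_none_none, PySem.List.pyRange_zero_natCast, List.foldl_map,
    Nat.cast_inj, flip_step, foldl_skip_eq]
  rw [PySem.List.foldl_append_eq_flatMap]
  rfl

-- folding {k: 1} inserts builds exactly the first-occurrence dedup, each with value 1
theorem getD_foldl_insert_one (L : List String) (dd : PySem.Dict String Int) (k : String)
    (h : dd.getD k 1 = 1) :
    (L.foldl (fun dd k' => dd.insert k' (1 : Int)) dd).getD k 1 = 1 := by
  induction L generalizing dd with
  | nil => simpa using h
  | cons x L ih =>
      simp only [List.foldl_cons]
      refine ih _ ?_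
      rw [PySem.Dict.getD_insert]
      split_ifs with hx
      · rfl
      · exact h

theorem items_foldl_insert_one (L : List String) :
    ((L.foldl (fun dd k => dd.insert k (1 : Int)) PySem.Dict.empty)).items
      = (PySem.Set.ofList L).map (fun k => (k, (1 : Int))) := by
  have hkeys : (L.foldl (fun dd k => dd.insert k (1 : Int)) PySem.Dict.empty).keys
      = PySem.Set.ofList L := by
    rw [PySem.Dict.keys_foldl_insert L (fun _ _ => (1 : Int)) PySem.Dict.empty,
      PySem.Dict.keys_empty, PySem.Set.update_nil_left]
  have hnd : (L.foldl (fun dd k => dd.insert k (1 : Int)) PySem.Dict.empty).keys.Nodup := by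
    rw [hkeys]; exact PySem.Set.nodup_ofList L
  rw [PySem.Dict.items_eq_map_keys _ hnd 1, hkeys]
  refine List.map_congr_left ?_
  intro k _
  rw [getD_foldl_insert_one L PySem.Dict.empty k (by rw [PySem.Dict.getD_empty])]

-- ---- the combinatorial heart: dedup of A's stream is B's stream ----

theorem rowA_nodup (cs : List Char) (m : Nat) (hm : m < cs.length) : (rowA cs m).Nodup := by
  unfold rowA
  refine List.Nodup.map_on ?_ (List.Nodup.filter _ (List.nodup_range))
  intro x hx y hy h
  simp only [List.mem_filter, List.mem_range, Bool.not_eq_eq_eq_not, Bool.not_true,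
    beq_eq_false_iff_ne, ne_eq] at hx hy
  have hk : key cs m x = key cs m y := String.ofList_inj.mp h
  have := key_inj cs m x m y hm hx.1 hm hy.1 (fun hc => hx.2 hc) (fun hc => hy.2 hc) hk
  omega

theorem dedup_prefix (cs : List Char) (m : Nat) (hm : m ≤ cs.length) :
    PySem.Set.ofList ((List.range m).flatMap (rowA cs))
      = (List.range m).flatMap (rowB cs) := by
  induction m with
  | zero => simp [PySem.Set.ofList, PySem.Set.empty]
  | succ m ih =>
      have hm' : m ≤ cs.length := by omega
      have hmn : m < cs.length := by omega
      rw [List.range_succ, List.flatMap_append, List.flatMap_append]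
      simp only [List.flatMap_cons, List.flatMap_nil, List.append_nil]
      rw [PySem.Set.ofList_append, ih hm', PySem.Set.update_eq_append_filter,
        PySem.Set.ofList_eq_self_of_nodup _ (rowA_nodup cs m hmn)]
      congr 1
      unfold rowA
      rw [List.filter_map, List.filter_filter]
      unfold rowB
      refine congrArg _ (List.filter_congr ?_)
      intro j hj
      have hjn : j < cs.length := List.mem_range.mp hj
      by_cases hmj : m = j
      · subst hmj
        simp
      · by_cases hlt : m < j
        · simp [Function.comp, hmj, hlt]
          intro a ha b hb hab he
          have hk : key cs a b = key cs m j := String.ofList_inj.mp he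
          have := key_inj cs a b m j (by omega) hb hmn hjn (by omega) hmj hk
          omega
        · simp [Function.comp, hlt]
          intro hall
          exact absurd (congrArg String.ofList (key_comm cs j m (by omega)))
            (hall j (by omega) m hmn (by omega))

theorem dedup_LA_eq_LB (cs : List Char) :
    PySem.Set.ofList ((List.range cs.length).flatMap (rowA cs))
      = (List.range cs.length).flatMap (rowB cs) :=
  dedup_prefix cs cs.length le_rfl

-- ---- normal form of port B ----

-- recursive views of B's two accumulators: the one-flip and two-flip variants of a suffix
def oneFlip : List Char → List (List Char)
  | [] => []
  | c :: rest => (flipC c :: rest) :: (oneFlip rest).map (c :: ·)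

def twoFlip : List Char → List (List Char)
  | [] => []
  | c :: rest => (oneFlip rest).map (flipC c :: ·) ++ (twoFlip rest).map (c :: ·)

-- B's fold over the reversed string computes exactly (oneFlip cs, twoFlip cs, cs)
theorem fold_state (cs : List Char) :
    cs.reverse.foldl
      (fun (st : List (List Char) × List (List Char) × List Char) c =>
        let f : Char := if c = '0' then '1' else '0'
        let twos := st.1.map (f :: ·) ++ st.2.1.map (c :: ·)
        let ones := (f :: st.2.2) :: st.1.map (c :: ·)
        (ones, twos, c :: st.2.2))
      ([], [], [])
      = (oneFlip cs, twoFlip cs, cs) := by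
  induction cs with
  | nil => rfl
  | cons c rest ih =>
      rw [List.reverse_cons, List.foldl_append, ih]
      simp [oneFlip, twoFlip, flipC]

theorem key_zero (c : Char) (cs : List Char) (j : Nat) :
    key (c :: cs) 0 (j + 1) = flipC c :: cs.set j (flipC (cs.getD j ' ')) := by
  simp [key]

theorem key_succ (c : Char) (cs : List Char) (i j : Nat) :
    key (c :: cs) (i + 1) (j + 1) = c :: key cs i j := by
  simp [key]

theorem oneFlip_eq (cs : List Char) :
    oneFlip cs = (List.range cs.length).map (fun i => cs.set i (flipC (cs.getD i ' '))) := by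
  induction cs with
  | nil => rfl
  | cons c rest ih =>
      rw [oneFlip, ih, List.length_cons, List.range_succ_eq_map, List.map_cons, List.map_map,
        List.map_map]
      refine List.cons_eq_cons.mpr ⟨rfl, List.map_congr_left fun i _ => rfl⟩

theorem twoFlip_eq (cs : List Char) :
    twoFlip cs = (List.range cs.length).flatMap (fun i =>
      ((List.range cs.length).filter (fun j => decide (i < j))).map (key cs i)) := by
  induction cs with
  | nil => rfl
  | cons c rest ih =>
      rw [twoFlip, List.length_cons, List.range_succ_eq_map, List.flatMap_cons, List.flatMap_map]
      congr 1
      · rw [List.filter_cons, if_neg (by simp), List.filter_map]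
        have hfil : (List.range rest.length).filter ((fun j => decide (0 < j)) ∘ Nat.succ)
            = List.range rest.length :=
          List.filter_eq_self.mpr (fun a _ => by simp [Function.comp])
        rw [hfil, List.map_map, oneFlip_eq, List.map_map]
        refine List.map_congr_left ?_
        intro j _
        simpa [Function.comp] using key_zero c rest j
      · rw [ih, List.map_flatMap]
        refine List.flatMap_congr ?_
        intro i _
        rw [List.filter_cons, if_neg (by simp), List.filter_map, List.map_map, List.map_map]
        have hp : ((fun j => decide (Nat.succ i < j)) ∘ Nat.succ) = (fun j => decide (i < j)) := by
          funext j; simp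
        rw [hp]
        refine List.map_congr_left ?_
        intro j _
        simpa [Function.comp] using (key_succ c rest i j).symm

-- B's stream of strings is the concatenation of the rowB streams
theorem flatMap_rowB (cs : List Char) :
    (List.range cs.length).flatMap (rowB cs)
      = ((List.range cs.length).flatMap (fun i =>
          ((List.range cs.length).filter (fun j => decide (i < j))).map (key cs i))).map
          String.ofList := by
  rw [List.map_flatMap]
  unfold rowB
  simp only [List.map_map]
  rfl

-- a dict built from pairs with distinct keys has exactly those pairs as items
theorem items_eq_of_nodup (ps qs : List (String × Int)) (h : ps = qs)
    (hnd : (qs.map Prod.fst).Nodup) : (PySem.Dict.ofList ps).items = qs := by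
  subst h
  show (List.foldl (fun acc p => acc.insert p.1 p.2) PySem.Dict.empty ps).items = ps
  rw [PySem.Dict.items_foldl_insert_fresh ps Prod.fst Prod.snd PySem.Dict.empty
    (fun a _ => PySem.Dict.contains_empty _) hnd]
  simp [show PySem.Dict.empty.items = ([] : List (String × Int)) from rfl]

theorem b_norm (s : String) :
    compute_two_distance_alt s =
      ((List.range s.toList.length).flatMap (rowB s.toList)).map (fun k => (k, (1 : Int))) := by
  have LBnodup : ((List.range s.toList.length).flatMap (rowB s.toList)).Nodup := by
    rw [← dedup_LA_eq_LB]
    exact PySem.Set.nodup_ofList _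
  unfold compute_two_distance_alt
  rw [fold_state]
  refine items_eq_of_nodup _ _ ?_ ?_
  · rw [twoFlip_eq, flatMap_rowB, List.map_map, List.map_flatMap, List.map_flatMap]
    rfl
  · rw [List.map_map]
    simpa [Function.comp_def] using LBnodup

-- ===== VERDICT (by name: the statement is the Claim_ definition above) =====
theorem compute_two_distance_spec : Claim_equal_compute_two_distance := by
  intro s _
  unfold Spec_compute_two_distance
  rw [a_two_combs, items_foldl_insert_one, dedup_LA_eq_LB, b_norm]
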